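-- pv_equiv track=rewrite | github.com/mporter2024/SHIELD_SAVER | Backend/routes/ai.py | _find_task_by_reference
-- ===== SOURCE A (Python) =====
-- def _normalize_text(value):
--     return (value or "").strip().lower()
--
-- def _find_task_by_reference(task_title, tasks, event_id=None):
--     if not task_title:
--         return None
--
--     candidate_tasks = tasks
--     if event_id is not None:
--         candidate_tasks = [task for task in tasks if int(task.get("event_id", 0)) == int(event_id)]
--
--     normalized_query = _normalize_text(task_title)
--
--     for task in candidate_tasks:
--         task_name = _normalize_text(task.get("title"))
--         if task_name == normalized_query:
--             return task
--
--     for task in candidate_tasks: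
--         task_name = _normalize_text(task.get("title"))
--         if normalized_query in task_name or task_name in normalized_query:
--             return task
--
--     query_tokens = {token for token in normalized_query.split() if len(token) > 2}
--     best_task = None
--     best_score = 0
--
--     for task in candidate_tasks:
--         task_tokens = {token for token in _normalize_text(task.get("title")).split() if len(token) > 2}
--         overlap = len(query_tokens & task_tokens)
--         if overlap > best_score:
--             best_score = overlap
--             best_task = task
--
--     return best_task if best_score >= 1 else None
-- ===== SOURCE B (Python) =====
-- def _normalize_text(value):
--     return (value or "").strip().lower()
--
-- def _find_task_by_reference(task_title, tasks, event_id=None):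
--     if not task_title:
--         return None
--
--     query = _normalize_text(task_title)
--     query_tokens = {token for token in query.split() if len(token) > 2}
--
--     best_task = None
--     best_key = (0, 0)
--     for task in tasks:
--         if event_id is not None and int(task.get("event_id", 0)) != int(event_id):
--             continue
--         name = _normalize_text(task.get("title"))
--         if name == query:
--             key = (2, 0)
--         elif query in name or name in query:
--             key = (1, 0)
--         else:
--             tokens = {token for token in name.split() if len(token) > 2}
--             key = (0, len(query_tokens & tokens))
--         if key > best_key:
--             best_key = key
--             best_task = task
--
--     return best_task if best_key > (0, 0) else None
-- ===== Notes on version B (the rewrite author's own statement) =====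
-- stated objective: alternative
-- what changed: A's three sequential scans (exact match, then substring match, then best token-overlap) are replaced by a single pass over the tasks that keeps the best (tier, score) key, updating only on strictly greater keys so the first-encountered best wins; Pre_ only excludes inputs where A raises ValueError on an unparsable event_id string.
import Mathlib
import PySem

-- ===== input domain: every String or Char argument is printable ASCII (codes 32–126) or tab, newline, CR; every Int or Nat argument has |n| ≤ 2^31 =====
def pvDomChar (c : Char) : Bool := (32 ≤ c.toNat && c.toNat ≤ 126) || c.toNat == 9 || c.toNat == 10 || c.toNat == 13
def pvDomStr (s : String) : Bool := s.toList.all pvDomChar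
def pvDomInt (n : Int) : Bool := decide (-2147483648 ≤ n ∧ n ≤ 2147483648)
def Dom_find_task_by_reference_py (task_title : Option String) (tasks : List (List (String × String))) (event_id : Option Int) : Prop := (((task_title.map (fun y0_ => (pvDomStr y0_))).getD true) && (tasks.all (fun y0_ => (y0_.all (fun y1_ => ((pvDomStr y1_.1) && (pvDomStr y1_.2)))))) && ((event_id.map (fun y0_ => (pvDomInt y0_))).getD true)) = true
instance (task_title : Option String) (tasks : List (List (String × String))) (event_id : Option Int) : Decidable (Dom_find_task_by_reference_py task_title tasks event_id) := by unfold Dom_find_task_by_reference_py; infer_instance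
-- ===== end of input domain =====

-- B replaces A's three sequential scans (exact / substring / token-overlap) by ONE pass that
-- maintains the best (tier, score) key; same return value, objective: alternative decomposition.

set_option maxHeartbeats 1000000

-- ===== PORT A =====
-- _normalize_text(value) = (value or "").strip().lower()
def pvNorm (v : Option String) : String := PySem.Str.lower (PySem.Str.strip (v.getD ""))
-- task.get(k) on the association-list dict
def pvGet (task : List (String × String)) (k : String) : Option String := (PySem.Dict.mk task).get? k
-- int(task.get("event_id", 0)); ofStr? none = ValueError (Python raises there — excluded by Pre_, .getD 0 is a placeholder)
def pvEvInt (task : List (String × String)) : Int :=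
  match pvGet task "event_id" with
  | none => 0
  | some s => (PySem.Int.ofStr? s).getD 0
-- {token for token in s.split() if len(token) > 2}
def pvToks (s : String) : PySem.Set String :=
  PySem.Set.ofList ((PySem.Str.split₀ s).filter (fun w => decide (PySem.Str.len w > 2)))

-- the loop conditions of A's three scans, named
def pvPe (q : String) (t : List (String × String)) : Bool := pvNorm (pvGet t "title") == q
def pvPs (q : String) (t : List (String × String)) : Bool :=
  PySem.Str.isIn q (pvNorm (pvGet t "title")) || PySem.Str.isIn (pvNorm (pvGet t "title")) q
-- the body of A's third (token-overlap) loop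
def pvStepA (qtok : PySem.Set String) (st : Option (List (String × String)) × Nat) (t : List (String × String)) : Option (List (String × String)) × Nat :=
  let ov := (PySem.Set.inter qtok (pvToks (pvNorm (pvGet t "title")))).length
  if ov > st.2 then (some t, ov) else st

def find_task_by_reference_py (task_title : Option String) (tasks : List (List (String × String))) (event_id : Option Int) : Option (List (String × String)) :=
  match task_title with
  | none => none
  | some s =>
    if s = "" then none else
    let candidate_tasks :=
      match event_id with
      | none => tasks
      | some e => tasks.filter (fun t => pvEvInt t == e)
    let q := pvNorm (some s)
    match candidate_tasks.find? (pvPe q) with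
    | some t => some t
    | none =>
      match candidate_tasks.find? (pvPs q) with
      | some t => some t
      | none =>
        let qtok := pvToks q
        let r := candidate_tasks.foldl (pvStepA qtok) (none, 0)
        if r.2 ≥ 1 then r.1 else none

-- ===== PORT B =====
-- tuple comparison key > best_key (Python lexicographic > on (tier, score))
def pvKeyGt (a b : Nat × Nat) : Bool := a.1 > b.1 || (a.1 == b.1 && a.2 > b.2)
-- the per-task key of Source B's loop body
def pvKey (q : String) (qtok : PySem.Set String) (t : List (String × String)) : Nat × Nat :=
  if pvNorm (pvGet t "title") == q then (2, 0)
  else if PySem.Str.isIn q (pvNorm (pvGet t "title")) || PySem.Str.isIn (pvNorm (pvGet t "title")) q then (1, 0)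
  else (0, (PySem.Set.inter qtok (pvToks (pvNorm (pvGet t "title")))).length)
-- Source B's loop body once the event filter accepted the task
def pvStepB (q : String) (qtok : PySem.Set String) (st : Option (List (String × String)) × (Nat × Nat)) (t : List (String × String)) : Option (List (String × String)) × (Nat × Nat) :=
  if pvKeyGt (pvKey q qtok t) st.2 then (some t, pvKey q qtok t) else st

def find_task_by_reference_py_alt (task_title : Option String) (tasks : List (List (String × String))) (event_id : Option Int) : Option (List (String × String)) :=
  match task_title with
  | none => none
  | some s =>
    if s = "" then none else
    let q := pvNorm (some s)
    let qtok := pvToks q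
    let r := tasks.foldl (fun (st : Option (List (String × String)) × (Nat × Nat)) t =>
      if (match event_id with | none => false | some e => pvEvInt t != e) then st
      else pvStepB q qtok st t) (none, (0, 0))
    if pvKeyGt r.2 (0, 0) then r.1 else none

-- ===== PRECONDITION & SPEC =====
-- Pre_ excludes only the inputs where Python A raises ValueError: an event_id filter is requested
-- and some task carries an "event_id" value that int() cannot parse.
def Pre_find_task_by_reference_py (task_title : Option String) (tasks : List (List (String × String))) (event_id : Option Int) : Prop :=
  task_title = none ∨ task_title = some "" ∨ event_id = none ∨
  ∀ t ∈ tasks, (match (PySem.Dict.mk t).get? "event_id" with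
                | some s => (PySem.Int.ofStr? s).isSome
                | none => true) = true
instance (task_title : Option String) (tasks : List (List (String × String))) (event_id : Option Int) : Decidable (Pre_find_task_by_reference_py task_title tasks event_id) := by unfold Pre_find_task_by_reference_py; infer_instance

def pvWitness_find_task_by_reference_py : Option String × (List (List (String × String))) × Option Int :=
  (some "fix bug", [[("title", "Fix the BUG"), ("event_id", "1")], [("title", "other")]], some 1)

def Spec_find_task_by_reference_py (task_title : Option String) (tasks : List (List (String × String))) (event_id : Option Int) (out : Option (List (String × String))) : Prop := out = find_task_by_reference_py_alt task_title tasks event_id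
instance (task_title : Option String) (tasks : List (List (String × String))) (event_id : Option Int) (out : Option (List (String × String))) : Decidable (Spec_find_task_by_reference_py task_title tasks event_id out) := by unfold Spec_find_task_by_reference_py; infer_instance

-- ===== CLAIM (what is proved, stated in full; the proofs are below) =====
def Claim_equal_find_task_by_reference_py : Prop := ∀ (task_title : Option String) (tasks : List (List (String × String))) (event_id : Option Int), Dom_find_task_by_reference_py task_title tasks event_id → Pre_find_task_by_reference_py task_title tasks event_id → Spec_find_task_by_reference_py task_title tasks event_id (find_task_by_reference_py task_title tasks event_id)

-- ===== LEMMAS AND PROOFS =====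

theorem pv_witness_ok : Dom_find_task_by_reference_py (pvWitness_find_task_by_reference_py.1) (pvWitness_find_task_by_reference_py.2.1) (pvWitness_find_task_by_reference_py.2.2) ∧ Pre_find_task_by_reference_py (pvWitness_find_task_by_reference_py.1) (pvWitness_find_task_by_reference_py.2.1) (pvWitness_find_task_by_reference_py.2.2) := by
  constructor <;> decide

-- a loop that skips elements = the same loop over the filtered list
theorem pv_foldl_skip {α σ : Type} (p : α → Bool) (g : σ → α → σ) (l : List α) (init : σ) :
    l.foldl (fun st t => if p t then st else g st t) init
      = (l.filter (fun t => !p t)).foldl g init := by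
  induction l generalizing init with
  | nil => rfl
  | cons h r ih => by_cases hp : p h = true <;> simp [hp, ih]

theorem pv_pe_ps (q : String) (t : List (String × String)) (h : pvPe q t = true) : pvPs q t = true := by
  unfold pvPe at h
  unfold pvPs
  have hq : pvNorm (pvGet t "title") = q := by simpa using h
  rw [hq]
  simp only [Bool.or_self, PySem.Str.isIn_iff_infix]
  exact List.infix_refl _

theorem pv_key_exact (q qtok) (t) (h : pvPe q t = true) : pvKey q qtok t = (2, 0) := by
  unfold pvKey; simp [show pvNorm (pvGet t "title") = q from by simpa [pvPe] using h]

theorem pv_key_sub (q qtok) (t) (he : pvPe q t = false) (hs : pvPs q t = true) : pvKey q qtok t = (1, 0) := by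
  unfold pvKey
  unfold pvPe at he; unfold pvPs at hs
  rw [he, hs]
  simp

theorem pv_key_tok (q qtok) (t) (hs : pvPs q t = false) :
    pvKey q qtok t = (0, (PySem.Set.inter qtok (pvToks (pvNorm (pvGet t "title")))).length) := by
  have he : pvPe q t = false := by
    by_contra hc
    have := pv_pe_ps q t (by revert hc; cases h : pvPe q t <;> simp)
    simp [this] at hs
  unfold pvKey
  unfold pvPe at he; unfold pvPs at hs
  rw [he, hs]
  simp

theorem pv_key_not_exact (q qtok) (t) (he : pvPe q t = false) :
    pvKey q qtok t = (1, 0) ∨ ∃ n, pvKey q qtok t = (0, n) := by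
  by_cases hs : pvPs q t = true
  · exact Or.inl (pv_key_sub q qtok t he hs)
  · exact Or.inr ⟨_, pv_key_tok q qtok t (by simpa using hs)⟩

-- ---- generic single-pass lemmas, stated over an abstract key so that whnf never
-- ---- has to look inside string computations

-- once the accumulator key is (2,0) nothing can beat it
theorem pv_gfreeze2 {τ : Type} (key : τ → Nat × Nat)
    (Hsh : ∀ u, key u = (2, 0) ∨ key u = (1, 0) ∨ ∃ n, key u = (0, n)) :
    ∀ (l : List τ) (b : Option τ),
    l.foldl (fun st t => if pvKeyGt (key t) st.2 then (some t, key t) else st) (b, (2, 0)) = (b, (2, 0)) := by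
  intro l
  induction l with
  | nil => intro b; rfl
  | cons h r ih =>
    intro b
    have hf : pvKeyGt (key h) (2, 0) = false := by
      rcases Hsh h with h1 | h1 | ⟨n, h1⟩ <;> simp [h1, pvKeyGt]
    simp only [List.foldl_cons]
    rw [if_neg (by simp [hf])]
    exact ih b

-- with no exact match left, the accumulator key (1,0) is final
theorem pv_gfreeze1 {τ : Type} (key : τ → Nat × Nat) :
    ∀ (l : List τ) (b : Option τ),
    (∀ u ∈ l, key u = (1, 0) ∨ ∃ n, key u = (0, n)) →
    l.foldl (fun st t => if pvKeyGt (key t) st.2 then (some t, key t) else st) (b, (1, 0)) = (b, (1, 0)) := by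
  intro l
  induction l with
  | nil => intro b _; rfl
  | cons h r ih =>
    intro b hsh
    have hf : pvKeyGt (key h) (1, 0) = false := by
      rcases hsh h (by simp) with h1 | ⟨n, h1⟩ <;> simp [h1, pvKeyGt]
    simp only [List.foldl_cons]
    rw [if_neg (by simp [hf])]
    exact ih b (fun u hu => hsh u (List.mem_cons_of_mem _ hu))

-- if l contains a P-element, the fold lands on the FIRST one (accumulator tier ≤ 1)
theorem pv_glemA {τ : Type} (key : τ → Nat × Nat) (P : τ → Bool)
    (H2 : ∀ u, P u = true → key u = (2, 0))
    (Hn2 : ∀ u, P u = false → key u = (1, 0) ∨ ∃ n, key u = (0, n)) :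
    ∀ (l : List τ) (t : τ) (b : Option τ) (k : Nat × Nat), k.1 ≤ 1 →
    l.find? P = some t →
    l.foldl (fun st t => if pvKeyGt (key t) st.2 then (some t, key t) else st) (b, k) = (some t, (2, 0)) := by
  have Hsh : ∀ u, key u = (2, 0) ∨ key u = (1, 0) ∨ ∃ n, key u = (0, n) := by
    intro u
    cases hp : P u
    · exact Or.inr (Hn2 u hp)
    · exact Or.inl (H2 u hp)
  intro l
  induction l with
  | nil => intro t b k hk hf; simp at hf
  | cons h r ih =>
    intro t b k hk hf
    rw [List.find?_cons] at hf
    cases hh : P h with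
    | true =>
      rw [hh] at hf
      injection hf with hf; subst hf
      have hgt : pvKeyGt (key h) k = true := by
        rw [H2 h hh]; unfold pvKeyGt; simp; omega
      simp only [List.foldl_cons]
      rw [if_pos hgt, H2 h hh]
      exact pv_gfreeze2 key Hsh r (some h)
    | false =>
      rw [hh] at hf
      simp only [List.foldl_cons]
      by_cases hgt : pvKeyGt (key h) k = true
      · rw [if_pos hgt]
        have hk' : (key h).1 ≤ 1 := by
          rcases Hn2 h hh with h1 | ⟨n, h1⟩ <;> simp [h1]
        exact ih t (some h) (key h) hk' hf
      · rw [if_neg hgt]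
        exact ih t b k hk hf

-- no P-element at all, but one satisfying Q: the fold lands on the FIRST Q-element
theorem pv_glemB {τ : Type} (key : τ → Nat × Nat) (P Q : τ → Bool)
    (H1 : ∀ u, P u = false → Q u = true → key u = (1, 0))
    (H0 : ∀ u, Q u = false → ∃ n, key u = (0, n))
    (Hn2 : ∀ u, P u = false → key u = (1, 0) ∨ ∃ n, key u = (0, n)) :
    ∀ (l : List τ) (t : τ) (b : Option τ) (s : Nat),
    (∀ u ∈ l, P u = false) →
    l.find? Q = some t →
    l.foldl (fun st t => if pvKeyGt (key t) st.2 then (some t, key t) else st) (b, (0, s)) = (some t, (1, 0)) := by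
  intro l
  induction l with
  | nil => intro t b s _ hf; simp at hf
  | cons h r ih =>
    intro t b s hne hf
    have hh := hne h (by simp)
    rw [List.find?_cons] at hf
    cases hq : Q h with
    | true =>
      rw [hq] at hf
      injection hf with hf; subst hf
      have hkey := H1 h hh hq
      have hgt : pvKeyGt (key h) (0, s) = true := by rw [hkey]; simp [pvKeyGt]
      simp only [List.foldl_cons]
      rw [if_pos hgt, hkey]
      exact pv_gfreeze1 key r (some h) (fun u hu => Hn2 u (hne u (List.mem_cons_of_mem _ hu)))
    | false =>
      rw [hq] at hf
      obtain ⟨n, hkey⟩ := H0 h hq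
      simp only [List.foldl_cons]
      by_cases hgt : pvKeyGt (key h) (0, s) = true
      · have : key h = (0, n) := hkey
        rw [if_pos hgt, hkey]
        exact ih t (some h) n (fun u hu => hne u (List.mem_cons_of_mem _ hu)) hf
      · rw [if_neg hgt]
        exact ih t b s (fun u hu => hne u (List.mem_cons_of_mem _ hu)) hf

-- no Q-element at all: the single pass simulates A's third loop
theorem pv_glemC {τ : Type} (key : τ → Nat × Nat) (Q : τ → Bool) (ov : τ → Nat)
    (H0 : ∀ u, Q u = false → key u = (0, ov u)) :
    ∀ (l : List τ) (b : Option τ) (s : Nat),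
    (∀ u ∈ l, Q u = false) →
    l.foldl (fun st t => if pvKeyGt (key t) st.2 then (some t, key t) else st) (b, (0, s))
      = ((l.foldl (fun (st : Option τ × Nat) t => if ov t > st.2 then (some t, ov t) else st) (b, s)).1,
         (0, (l.foldl (fun (st : Option τ × Nat) t => if ov t > st.2 then (some t, ov t) else st) (b, s)).2)) := by
  intro l
  induction l with
  | nil => intro b s _; rfl
  | cons h r ih =>
    intro b s hns
    have hkey := H0 h (hns h (by simp))
    have hgt : pvKeyGt (key h) (0, s) = decide (ov h > s) := by rw [hkey]; simp [pvKeyGt]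
    simp only [List.foldl_cons]
    by_cases hov : ov h > s
    · rw [if_pos (by rw [hgt]; simpa using hov), if_pos hov, hkey]
      exact ih (some h) (ov h) (fun u hu => hns u (List.mem_cons_of_mem _ hu))
    · rw [if_neg (by rw [hgt]; simpa using hov), if_neg hov]
      exact ih b s (fun u hu => hns u (List.mem_cons_of_mem _ hu))

-- the equivalence over an arbitrary candidate list
theorem pv_main_core (q : String) (qtok : PySem.Set String) (cands : List (List (String × String))) :
    (match cands.find? (pvPe q) with
     | some t => some t
     | none =>
       match cands.find? (pvPs q) with
       | some t => some t
       | none =>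
         let r := cands.foldl (pvStepA qtok) (none, 0)
         if r.2 ≥ 1 then r.1 else none)
      = (let r := cands.foldl (pvStepB q qtok) (none, (0, 0))
         if pvKeyGt r.2 (0, 0) then r.1 else none) := by
  have hstepB : pvStepB q qtok = (fun st t => if pvKeyGt (pvKey q qtok t) st.2 then (some t, pvKey q qtok t) else st) := rfl
  cases hfe : cands.find? (pvPe q) with
  | some t =>
    rw [hstepB, pv_glemA (pvKey q qtok) (pvPe q) (pv_key_exact q qtok) (pv_key_not_exact q qtok)
        cands t none (0, 0) (by simp) hfe]
    rfl
  | none =>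
    have hne : ∀ u ∈ cands, pvPe q u = false := by
      intro u hu
      have := List.find?_eq_none.1 hfe u hu
      simpa using this
    cases hfs : cands.find? (pvPs q) with
    | some t =>
      rw [hstepB, pv_glemB (pvKey q qtok) (pvPe q) (pvPs q)
          (fun u => pv_key_sub q qtok u) (fun u hq => ⟨_, pv_key_tok q qtok u hq⟩)
          (pv_key_not_exact q qtok) cands t none 0 hne hfs]
      rfl
    | none =>
      have hns : ∀ u ∈ cands, pvPs q u = false := by
        intro u hu
        have := List.find?_eq_none.1 hfs u hu
        simpa using this
      have hstepA : pvStepA qtok = (fun (st : Option (List (String × String)) × Nat) t =>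
          if (PySem.Set.inter qtok (pvToks (pvNorm (pvGet t "title")))).length > st.2
          then (some t, (PySem.Set.inter qtok (pvToks (pvNorm (pvGet t "title")))).length) else st) := rfl
      rw [hstepB, hstepA, pv_glemC (pvKey q qtok) (pvPs q)
          (fun u => (PySem.Set.inter qtok (pvToks (pvNorm (pvGet u "title")))).length)
          (fun u hq => pv_key_tok q qtok u hq) cands none 0 hns]
      rw [← hstepA]
      cases hR : cands.foldl (pvStepA qtok) (none, 0) with
      | mk b1 n1 =>
        simp only [pvKeyGt]
        cases n1 <;> simp

-- ===== VERDICT (by name: the statement is the Claim_ definition above) =====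
theorem find_task_by_reference_py_spec : Claim_equal_find_task_by_reference_py := by
  intro task_title tasks event_id _hdom _hpre
  unfold Spec_find_task_by_reference_py
  cases task_title with
  | none => rfl
  | some s =>
    by_cases hs : s = ""
    · simp [find_task_by_reference_py, find_task_by_reference_py_alt, hs]
    · unfold find_task_by_reference_py find_task_by_reference_py_alt
      simp only [hs, if_false]
      set q := pvNorm (some s) with hq
      set qtok := pvToks q with hqt
      clear_value qtok q
      cases event_id with
      | none =>
        have hcand : (match (none : Option Int) with
                      | none => tasks
                      | some e => tasks.filter (fun t => pvEvInt t == e)) = tasks := rfl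
        have hskip : (fun (st : Option (List (String × String)) × (Nat × Nat)) t =>
            if (match (none : Option Int) with | none => false | some e => pvEvInt t != e) = true then st
            else pvStepB q qtok st t) = pvStepB q qtok := by
          funext st t
          show (if (false = true) then st else pvStepB q qtok st t) = pvStepB q qtok st t
          rw [if_neg (by decide)]
        rw [hcand, hskip]
        exact pv_main_core q qtok tasks
      | some e =>
        have hBfold := pv_foldl_skip
          (fun t => (match (some e : Option Int) with | none => false | some e => pvEvInt t != e))
          (pvStepB q qtok) tasks (none, (0, 0))
        have hpred : (fun t => !(match (some e : Option Int) with | none => false | some e => pvEvInt t != e))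
            = (fun t => pvEvInt t == e) := by
          funext t
          show (!(pvEvInt t != e)) = (pvEvInt t == e)
          simp [bne]
        rw [hpred] at hBfold
        rw [hBfold]
        exact pv_main_core q qtok (tasks.filter (fun t => pvEvInt t == e))
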